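-- pv_equiv track=rewrite | github.com/matsrosbach/adventofcode21 | day19/beacon_scanner1.py | get_no_of_overlaps
-- ===== SOURCE A (Python) =====
-- def get_no_of_overlaps(s1, s2, x_offset, y_offset, z_offset):
--     no_overlaps = 0
--     for b1 in s1:
--         for b2 in s2:
--             b2_aligned = [b2[0] + x_offset, b2[1] + y_offset, b2[2] + z_offset]
--             if b1 == b2_aligned:
--                 no_overlaps += 1
--
--     return no_overlaps
-- ===== SOURCE B (Python) =====
-- def get_no_of_overlaps(s1, s2, x_offset, y_offset, z_offset):
--     # Multiset-intersection weight: frequency tables of both sides, then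
--     # sum of products of counts over the keys of c1.
--     c1 = {}
--     for b1 in s1:
--         k = tuple(b1)
--         c1[k] = c1.get(k, 0) + 1
--     c2 = {}
--     for b2 in s2:
--         k = (b2[0] + x_offset, b2[1] + y_offset, b2[2] + z_offset)
--         c2[k] = c2.get(k, 0) + 1
--     return sum(c1[k] * c2.get(k, 0) for k in c1)
-- ===== Notes on version B (the rewrite author's own statement) =====
-- stated objective: faster
-- what changed: Replaces the nested all-pairs scan by two frequency tables (of s1 tuples and of shifted s2 tuples) built in single passes, then the answer is the multiset-intersection weight: the sum over c1's keys of c1[k]*c2[k].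
-- outside the precondition, e.g. on get_no_of_overlaps([], [[1]], 0, 0, 0): A returns 0, B raises IndexError
import Mathlib
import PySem

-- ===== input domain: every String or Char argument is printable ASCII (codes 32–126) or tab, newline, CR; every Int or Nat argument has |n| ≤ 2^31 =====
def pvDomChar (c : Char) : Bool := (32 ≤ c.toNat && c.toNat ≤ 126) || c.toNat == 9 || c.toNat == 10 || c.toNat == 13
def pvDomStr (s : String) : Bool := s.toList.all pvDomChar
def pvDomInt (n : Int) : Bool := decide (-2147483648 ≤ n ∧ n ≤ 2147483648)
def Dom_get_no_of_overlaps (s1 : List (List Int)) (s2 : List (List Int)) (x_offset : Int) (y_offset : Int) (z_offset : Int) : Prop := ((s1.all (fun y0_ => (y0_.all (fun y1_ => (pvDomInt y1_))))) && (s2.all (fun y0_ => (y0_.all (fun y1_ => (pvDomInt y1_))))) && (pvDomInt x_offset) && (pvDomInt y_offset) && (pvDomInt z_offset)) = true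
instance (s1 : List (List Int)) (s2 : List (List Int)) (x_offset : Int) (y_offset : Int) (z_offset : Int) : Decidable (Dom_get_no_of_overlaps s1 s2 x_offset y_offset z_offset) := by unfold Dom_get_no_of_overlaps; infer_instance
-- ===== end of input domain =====

-- B replaces A's nested all-pairs scan by two frequency tables (s1 tuples, shifted s2
-- tuples) and returns the multiset-intersection weight Σ_k c1[k]*c2[k] (objective: faster).

-- ===== PORT A =====
def get_no_of_overlaps (s1 : List (List Int)) (s2 : List (List Int)) (x_offset : Int) (y_offset : Int) (z_offset : Int) : Int :=
  s1.foldl (fun no_overlaps b1 =>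
    s2.foldl (fun no_overlaps b2 =>
      let b2_aligned := [PySem.List.pyGetD b2 0 0 + x_offset,
                         PySem.List.pyGetD b2 1 0 + y_offset,
                         PySem.List.pyGetD b2 2 0 + z_offset]
      if b1 = b2_aligned then no_overlaps + 1 else no_overlaps)
      no_overlaps) 0

-- ===== PORT B =====
-- Python tuple keys are encoded as List Int (tuple(b1) is b1; tuple equality = list equality).
-- 'for k in c1' iterates c1's keys in insertion order; c1[k] on a present key is getD k 0.
def get_no_of_overlaps_alt (s1 : List (List Int)) (s2 : List (List Int)) (x_offset : Int) (y_offset : Int) (z_offset : Int) : Int :=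
  let c1 : PySem.Dict (List Int) Int :=
    s1.foldl (fun d b1 => d.insert b1 (d.getD b1 0 + 1)) PySem.Dict.empty
  let c2 : PySem.Dict (List Int) Int :=
    s2.foldl (fun d b2 =>
      let k := [PySem.List.pyGetD b2 0 0 + x_offset,
                PySem.List.pyGetD b2 1 0 + y_offset,
                PySem.List.pyGetD b2 2 0 + z_offset]
      d.insert k (d.getD k 0 + 1)) PySem.Dict.empty
  (c1.keys.map (fun k => c1.getD k 0 * c2.getD k 0)).sum

-- ===== PRECONDITION & SPEC =====
-- Pre_ excludes any s2 containing a row shorter than 3: B's counter pass always indexes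
-- b2[0..2] and raises there, while A, which indexes the same elements inside its nested
-- loop, raises only when s1 is nonempty (with s1 = [] it returns 0 without looking at s2 —
-- an accident of loop order not worth mimicking).
def Pre_get_no_of_overlaps (s1 : List (List Int)) (s2 : List (List Int)) (x_offset : Int) (y_offset : Int) (z_offset : Int) : Prop :=
  ∀ b2 ∈ s2, 3 ≤ b2.length
instance (s1 : List (List Int)) (s2 : List (List Int)) (x_offset : Int) (y_offset : Int) (z_offset : Int) : Decidable (Pre_get_no_of_overlaps s1 s2 x_offset y_offset z_offset) := by unfold Pre_get_no_of_overlaps; infer_instance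
def pvWitness_get_no_of_overlaps : List (List Int) × List (List Int) × Int × Int × Int :=
  ([[1, 2, 3], [4, 5, 6]], [[0, 0, 3]], 1, 2, 0)

def Spec_get_no_of_overlaps (s1 : List (List Int)) (s2 : List (List Int)) (x_offset : Int) (y_offset : Int) (z_offset : Int) (out : Int) : Prop := out = get_no_of_overlaps_alt s1 s2 x_offset y_offset z_offset
instance (s1 : List (List Int)) (s2 : List (List Int)) (x_offset : Int) (y_offset : Int) (z_offset : Int) (out : Int) : Decidable (Spec_get_no_of_overlaps s1 s2 x_offset y_offset z_offset out) := by unfold Spec_get_no_of_overlaps; infer_instance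

-- ===== CLAIM (what is proved, stated in full; the proofs are below) =====
def Claim_equal_get_no_of_overlaps : Prop := ∀ (s1 : List (List Int)) (s2 : List (List Int)) (x_offset : Int) (y_offset : Int) (z_offset : Int), Dom_get_no_of_overlaps s1 s2 x_offset y_offset z_offset → Pre_get_no_of_overlaps s1 s2 x_offset y_offset z_offset → Spec_get_no_of_overlaps s1 s2 x_offset y_offset z_offset (get_no_of_overlaps s1 s2 x_offset y_offset z_offset)

-- ===== LEMMAS AND PROOFS =====

-- the shift both Pythons apply to a row of s2 (proof-side abbreviation; definitionally
-- equal to the literal triple in both ports)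
def pvAlign (b2 : List Int) (x y z : Int) : List Int :=
  [PySem.List.pyGetD b2 0 0 + x, PySem.List.pyGetD b2 1 0 + y, PySem.List.pyGetD b2 2 0 + z]

-- A's inner loop over s2 counts the b2 whose shifted value equals b1.
theorem pv_inner_count (s2 : List (List Int)) (b1 : List Int) (x y z : Int) (acc : Int) :
    s2.foldl (fun no_overlaps b2 =>
      if b1 = pvAlign b2 x y z then no_overlaps + 1 else no_overlaps) acc
    = acc + ((s2.map (fun b2 => pvAlign b2 x y z)).count b1 : Int) := by
  induction s2 generalizing acc with
  | nil => simp
  | cons h t ih =>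
    simp only [List.foldl_cons, List.map_cons, ih]
    by_cases hb : b1 = pvAlign h x y z
    · simp [hb]; ring
    · simp [hb, Ne.symm hb]

-- A is the per-b1 sum of those counts.
theorem pv_A_eq_sum (s1 s2 : List (List Int)) (x y z : Int) :
    get_no_of_overlaps s1 s2 x y z
    = (s1.map (fun b1 => ((s2.map (fun b2 => pvAlign b2 x y z)).count b1 : Int))).sum := by
  show s1.foldl (fun no_overlaps b1 =>
      s2.foldl (fun no_overlaps b2 =>
        if b1 = pvAlign b2 x y z then no_overlaps + 1 else no_overlaps) no_overlaps) 0 = _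
  rw [show (fun no_overlaps b1 =>
      s2.foldl (fun no_overlaps b2 =>
        if b1 = pvAlign b2 x y z then no_overlaps + 1 else no_overlaps) no_overlaps)
    = (fun acc b1 => acc + ((s2.map (fun b2 => pvAlign b2 x y z)).count b1 : Int)) from
      funext fun acc => funext fun b1 => pv_inner_count s2 b1 x y z acc]
  rw [PySem.List.foldl_add s1 _ 0]
  ring

-- a sum over a nodup list of an indicator term picks out the single matching element
theorem pv_sum_single (S : List (List Int)) (v : List Int) (f : List Int → Int)
    (hn : S.Nodup) (hv : v ∈ S) :
    (S.map (fun k => if k = v then f k else 0)).sum = f v := by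
  induction S with
  | nil => cases hv
  | cons h t ih =>
    rcases List.mem_cons.mp hv with rfl | hvt
    · have hz : (t.map (fun k => if k = v then f k else 0)).sum = 0 := by
        apply List.sum_eq_zero
        intro a ha
        rcases List.mem_map.mp ha with ⟨k, hk, rfl⟩
        have : k ≠ v := fun e => (List.nodup_cons.mp hn).1 (e ▸ hk)
        simp [this]
      simp [hz]
    · have hne : h ≠ v := fun e => (List.nodup_cons.mp hn).1 (e ▸ hvt)
      simp [hne, ih (List.nodup_cons.mp hn).2 hvt]

-- grouping identity: summing f over l equals summing count·f over any nodup cover of l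
theorem pv_group_sum (l : List (List Int)) (S : List (List Int)) (f : List Int → Int)
    (hn : S.Nodup) (hsub : ∀ x ∈ l, x ∈ S) :
    (S.map (fun k => (l.count k : Int) * f k)).sum = (l.map f).sum := by
  induction l with
  | nil => simp
  | cons x t ih =>
    have hx : x ∈ S := hsub x List.mem_cons_self
    have ht : ∀ y ∈ t, y ∈ S := fun y hy => hsub y (List.mem_cons_of_mem x hy)
    have hsplit : (fun k => ((x :: t).count k : Int) * f k)
        = fun k => (t.count k : Int) * f k + (if k = x then f k else 0) := by
      funext k
      by_cases hk : k = x
      · simp [List.count_cons, hk]; ring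
      · simp [List.count_cons, hk]
        exact Or.inl (Ne.symm hk)
    rw [hsplit, PySem.List.sum_map_add_int S _ _, ih ht, pv_sum_single S x f hn hx]
    simp [add_comm]

-- B's second dictionary counts the shifted s2 rows: its lookup is a count in the shifted list.
theorem pv_c2_count (s2 : List (List Int)) (x y z : Int) (k : List Int) :
    (s2.foldl (fun d b2 =>
        d.insert (pvAlign b2 x y z) (d.getD (pvAlign b2 x y z) 0 + 1))
        (PySem.Dict.empty : PySem.Dict (List Int) Int)).getD k 0
    = ((s2.map (fun b2 => pvAlign b2 x y z)).count k : Int) := by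
  have h : s2.foldl (fun d b2 =>
        d.insert (pvAlign b2 x y z) (d.getD (pvAlign b2 x y z) 0 + 1))
        (PySem.Dict.empty : PySem.Dict (List Int) Int)
      = (s2.map (fun b2 => pvAlign b2 x y z)).foldl
          (fun d kk => d.insert kk (d.getD kk 0 + 1)) PySem.Dict.empty := by
    rw [List.foldl_map]
  rw [h, PySem.Dict.getD_foldl_insert_add_one]
  simp

-- B is the multiset-intersection weight over the distinct elements of s1.
theorem pv_B_eq_sum (s1 s2 : List (List Int)) (x y z : Int) :
    get_no_of_overlaps_alt s1 s2 x y z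
    = ((PySem.Set.ofList s1).map (fun k =>
        (s1.count k : Int) * ((s2.map (fun b2 => pvAlign b2 x y z)).count k : Int))).sum := by
  show ((s1.foldl (fun d b1 => d.insert b1 (d.getD b1 0 + 1))
          (PySem.Dict.empty : PySem.Dict (List Int) Int)).keys.map (fun k =>
      (s1.foldl (fun d b1 => d.insert b1 (d.getD b1 0 + 1))
          (PySem.Dict.empty : PySem.Dict (List Int) Int)).getD k 0 *
      (s2.foldl (fun d b2 =>
          d.insert (pvAlign b2 x y z) (d.getD (pvAlign b2 x y z) 0 + 1))
          (PySem.Dict.empty : PySem.Dict (List Int) Int)).getD k 0)).sum = _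
  simp only [PySem.Dict.foldl_insert_getD_add_one_eq_counter, PySem.Dict.keys_counter,
    PySem.Dict.getD_counter, pv_c2_count]

-- ===== VERDICT (by name: the statement is the Claim_ definition above) =====
theorem get_no_of_overlaps_spec : Claim_equal_get_no_of_overlaps := by
  intro s1 s2 x y z _ _
  unfold Spec_get_no_of_overlaps
  rw [pv_A_eq_sum, pv_B_eq_sum]
  exact (pv_group_sum s1 (PySem.Set.ofList s1) _
    (PySem.Set.nodup_ofList s1) (fun v hv => (PySem.Set.mem_ofList s1 v).mpr hv)).symm
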